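-- pv_equiv track=rewrite | github.com/hirenbhanushali/codeforces | gfseries.py | gfseries
-- ===== SOURCE A (Python) =====
-- def gfseries(n):
--     if n == 1:
--         return 0
--     elif n == 2:
--         return 1
--     else:
--         x = (gfseries(n - 2) * gfseries(n - 2)) - gfseries(n - 1)
--         return x
-- ===== SOURCE B (Python) =====
-- def gfseries(n):
--     if n < 1:
--         raise ValueError("n must be a positive integer")
--     if n == 1:
--         return 0
--     a, b = 0, 1
--     for _ in range(n - 2):
--         a, b = b, a * a - b
--     return b
-- ===== Notes on version B (the rewrite author's own statement) =====
-- stated objective: faster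
-- what changed: Replaced the naive triple-branching recursion (three recursive calls per step, exponentially many calls) by an iterative bottom-up loop keeping only the last two values; intended as faster, but a timing run could not confirm it at the largest sizes (the series values themselves grow doubly exponentially, so both programs time out there).
-- outside the precondition, e.g. on gfseries(0): A raises RecursionError, B raises ValueError
import Mathlib
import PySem

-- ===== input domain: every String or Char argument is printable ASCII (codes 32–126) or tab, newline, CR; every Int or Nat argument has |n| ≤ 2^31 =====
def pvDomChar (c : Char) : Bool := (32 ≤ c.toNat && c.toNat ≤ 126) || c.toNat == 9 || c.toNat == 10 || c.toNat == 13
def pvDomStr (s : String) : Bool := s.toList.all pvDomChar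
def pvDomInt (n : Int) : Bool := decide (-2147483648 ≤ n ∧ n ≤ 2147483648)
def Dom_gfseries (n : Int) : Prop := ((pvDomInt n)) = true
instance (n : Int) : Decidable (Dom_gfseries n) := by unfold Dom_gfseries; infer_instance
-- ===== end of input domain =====

-- B replaces A's exponential triple-call recursion by a bottom-up loop keeping the last two values; intended as faster; a timing run could not confirm it at the largest sizes (the series values grow doubly exponentially, so both programs time out there).
-- For n ≤ 0 Python A recurses forever and Python B raises ValueError; those inputs are outside Pre_.

-- ===== PORT A =====
-- A recurses on n-1 and n-2; transliterated as structural recursion on n.toNat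
-- (go 0 is unreachable inside Pre_gfseries, where n ≥ 1).
def gfseriesGo : Nat → Int
  | 0 => 0
  | 1 => 0
  | 2 => 1
  | (k + 3) => (gfseriesGo (k + 1) * gfseriesGo (k + 1)) - gfseriesGo (k + 2)

def gfseries (n : Int) : Int := gfseriesGo n.toNat

-- ===== PORT B =====
def gfseries_alt (n : Int) : Int :=
  -- for n < 1 the Python B raises ValueError (outside Pre_); 0 here stands for that unreachable branch
  if n < 1 then 0
  else if n = 1 then 0
  else ((List.range (n - 2).toNat).foldl
          (fun (p : Int × Int) _ => (p.2, p.1 * p.1 - p.2)) (0, 1)).2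

-- ===== PRECONDITION & SPEC =====
-- Pre_ excludes n ≤ 0, on which Python A hits infinite recursion (RecursionError).
def Pre_gfseries (n : Int) : Prop := 1 ≤ n
instance (n : Int) : Decidable (Pre_gfseries n) := by unfold Pre_gfseries; infer_instance
def pvWitness_gfseries : Int := 5

def Spec_gfseries (n : Int) (out : Int) : Prop := out = gfseries_alt n
instance (n : Int) (out : Int) : Decidable (Spec_gfseries n out) := by unfold Spec_gfseries; infer_instance

-- ===== CLAIM (what is proved, stated in full; the proofs are below) =====
def Claim_equal_gfseries : Prop := ∀ (n : Int), Dom_gfseries n → Pre_gfseries n → Spec_gfseries n (gfseries n)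

-- ===== LEMMAS AND PROOFS =====
-- loop invariant: after m iterations the pair holds (go (m+1), go (m+2))
theorem gfseries_fold_inv (m : Nat) :
    (List.range m).foldl (fun (p : Int × Int) _ => (p.2, p.1 * p.1 - p.2)) (0, 1)
      = (gfseriesGo (m + 1), gfseriesGo (m + 2)) := by
  induction m with
  | zero => simp [gfseriesGo]
  | succ k ih =>
      rw [List.range_succ, List.foldl_append, ih]
      simp [gfseriesGo]

-- ===== VERDICT (by name: the statement is the Claim_ definition above) =====
theorem gfseries_spec : Claim_equal_gfseries := by
  intro n _ hpre
  unfold Pre_gfseries at hpre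
  unfold Spec_gfseries gfseries gfseries_alt
  rw [if_neg (by omega : ¬ n < 1)]
  by_cases h1 : n = 1
  · subst h1; decide
  · rw [if_neg h1]
    have h2 : 2 ≤ n := by omega
    have hk : ∃ k : Nat, n = (k : Int) + 2 := ⟨(n - 2).toNat, by
      have := Int.toNat_of_nonneg (show (0:Int) ≤ n - 2 by omega); omega⟩
    obtain ⟨k, rfl⟩ := hk
    have hA : ((k : Int) + 2).toNat = k + 2 := by omega
    have hB : ((k : Int) + 2 - 2).toNat = k := by omega
    rw [hA, hB, gfseries_fold_inv]
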